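-- pv_equiv track=rewrite | github.com/Albertsilveraa/DEPLOYTEST | src/app.py | infer_table_from_query
-- ===== SOURCE A (Python) =====
-- def infer_table_from_query(query, semantic_map):
--     """
--     Intenta inferir la tabla a consultar a partir de la consulta en lenguaje natural
--     y del mapa semántico.
--     """
--     query_lower = query.lower()
--     # Buscar coincidencia completa en el nombre humanizado
--     for table, info in semantic_map.items():
--         human_table = info.get("human_name", table).lower()
--         if human_table in query_lower:
--             return table
--
--     # Buscar coincidencias parciales (por palabra)
--     for table, info in semantic_map.items():
--         human_table = info.get("human_name", table).lower()
--         for word in human_table.split():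
--             if word in query_lower:
--                 return table
--
--     # Fallback: retornar la primera tabla si existe
--     if semantic_map:
--         return list(semantic_map.keys())[0]
--     return None
-- ===== SOURCE B (Python) =====
-- def infer_table_from_query(query, semantic_map):
--     """Single pass: return on a full human-name match immediately; remember the
--     first table with a word-level partial match as a fallback candidate."""
--     query_lower = query.lower()
--     candidate = None
--     for table, info in semantic_map.items():
--         human_table = info.get("human_name", table).lower()
--         if human_table in query_lower:
--             return table
--         if candidate is None and any(w in query_lower for w in human_table.split()):
--             candidate = table
--     if candidate is not None:
--         return candidate
--     return next(iter(semantic_map), None)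
-- ===== Notes on version B (the rewrite author's own statement) =====
-- stated objective: simpler
-- what changed: Replaces A's two separate scans of the map (full-name matches, then word-level matches) by a single pass that returns a full match immediately and records only the first partial-match candidate, so the map is traversed once.
import Mathlib
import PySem

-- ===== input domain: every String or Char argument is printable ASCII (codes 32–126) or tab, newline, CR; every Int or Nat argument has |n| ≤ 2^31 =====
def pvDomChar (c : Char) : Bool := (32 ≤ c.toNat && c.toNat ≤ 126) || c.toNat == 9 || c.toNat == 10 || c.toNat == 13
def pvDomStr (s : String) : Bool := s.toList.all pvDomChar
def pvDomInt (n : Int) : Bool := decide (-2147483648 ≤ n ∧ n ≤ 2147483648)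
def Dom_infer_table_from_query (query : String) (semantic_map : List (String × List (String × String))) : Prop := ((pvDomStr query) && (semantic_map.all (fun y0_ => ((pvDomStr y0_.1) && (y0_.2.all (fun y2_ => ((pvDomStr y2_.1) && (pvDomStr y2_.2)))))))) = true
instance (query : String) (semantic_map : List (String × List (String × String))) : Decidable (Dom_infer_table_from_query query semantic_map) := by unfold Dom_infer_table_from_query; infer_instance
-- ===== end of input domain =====

-- B folds A's two scans of the map into one pass (full match returns at once, first
-- partial match is remembered as a candidate); objective: simpler, return value unchanged.

-- ===== PORT A =====
-- human_table = info.get("human_name", table).lower()  (shared subexpression of both ports)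
def pvHuman (table : String) (info : List (String × String)) : String :=
  PySem.Str.lower ((PySem.Dict.mk info).getD "human_name" table)

-- first loop of A: full human-name match
def pvLoopFull (ql : String) : List (String × List (String × String)) → Option String
  | [] => none
  | (t, info) :: rest =>
      if PySem.Str.isIn (pvHuman t info) ql then some t else pvLoopFull ql rest

-- second loop of A: word-level partial match (inner early-return loop = List.any)
def pvLoopPart (ql : String) : List (String × List (String × String)) → Option String
  | [] => none
  | (t, info) :: rest =>
      if (PySem.Str.split₀ (pvHuman t info)).any (fun w => PySem.Str.isIn w ql) then some t
      else pvLoopPart ql rest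

def infer_table_from_query (query : String) (semantic_map : List (String × List (String × String))) : Option String :=
  let query_lower := PySem.Str.lower query
  match pvLoopFull query_lower semantic_map with
  | some t => some t
  | none =>
    match pvLoopPart query_lower semantic_map with
    | some t => some t
    | none =>
      if semantic_map.isEmpty then none
      else PySem.List.pyGet? ((PySem.Dict.mk semantic_map).keys) 0

-- ===== PORT B =====
-- single pass carrying the first partial-match candidate
def pvScan (ql : String) (cand : Option String) : List (String × List (String × String)) → Option String
  | [] => cand
  | (t, info) :: rest =>
      let h := pvHuman t info
      if PySem.Str.isIn h ql then some t
      else pvScan ql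
        (if cand.isNone && (PySem.Str.split₀ h).any (fun w => PySem.Str.isIn w ql) then some t else cand)
        rest

def infer_table_from_query_alt (query : String) (semantic_map : List (String × List (String × String))) : Option String :=
  let query_lower := PySem.Str.lower query
  match pvScan query_lower none semantic_map with
  | some t => some t
  | none => semantic_map.head?.map Prod.fst

-- ===== PRECONDITION & SPEC =====
def Spec_infer_table_from_query (query : String) (semantic_map : List (String × List (String × String))) (out : Option String) : Prop := out = infer_table_from_query_alt query semantic_map
instance (query : String) (semantic_map : List (String × List (String × String))) (out : Option String) : Decidable (Spec_infer_table_from_query query semantic_map out) := by unfold Spec_infer_table_from_query; infer_instance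

-- ===== CLAIM (what is proved, stated in full; the proofs are below) =====
def Claim_equal_infer_table_from_query : Prop := ∀ (query : String) (semantic_map : List (String × List (String × String))), Dom_infer_table_from_query query semantic_map → Spec_infer_table_from_query query semantic_map (infer_table_from_query query semantic_map)

-- ===== LEMMAS AND PROOFS =====

-- the one-pass scan equals: full-match result, else the incoming candidate, else the partial-match result
theorem pvScan_eq (ql : String) : ∀ (xs : List (String × List (String × String))) (c : Option String),
    pvScan ql c xs = (pvLoopFull ql xs).or (c.or (pvLoopPart ql xs)) := by
  intro xs
  induction xs with
  | nil => intro c; simp [pvScan, pvLoopFull, pvLoopPart]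
  | cons p rest ih =>
      intro c
      obtain ⟨t, info⟩ := p
      by_cases hfull : PySem.Chars.isIn (pvHuman t info).toList ql.toList = true
      · simp [pvScan, pvLoopFull, hfull]
      · by_cases hpart : ∃ w ∈ PySem.Str.split₀ (pvHuman t info), PySem.Chars.isIn w.toList ql.toList = true
        · cases c with
          | none => simp [pvScan, pvLoopFull, pvLoopPart, hfull, hpart, ih]
          | some x => simp [pvScan, pvLoopFull, pvLoopPart, hfull, hpart, ih]
        · cases c with
          | none => simp [pvScan, pvLoopFull, pvLoopPart, hfull, hpart, ih]
          | some x => simp [pvScan, pvLoopFull, pvLoopPart, hfull, hpart, ih]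

-- the two fallbacks agree: first dict key = head of the association list
theorem pvFallback_eq (xs : List (String × List (String × String))) :
    (if xs.isEmpty then none else PySem.List.pyGet? ((PySem.Dict.mk xs).keys) 0) = xs.head?.map Prod.fst := by
  cases xs with
  | nil => rfl
  | cons p rest => simp [PySem.Dict.keys, PySem.List.pyGet?, PySem.List.pyIdx?]

-- ===== VERDICT (by name: the statement is the Claim_ definition above) =====
theorem infer_table_from_query_spec : Claim_equal_infer_table_from_query := by
  intro query semantic_map _
  unfold Spec_infer_table_from_query infer_table_from_query infer_table_from_query_alt
  simp only [pvScan_eq]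
  cases hf : pvLoopFull (PySem.Str.lower query) semantic_map with
  | some t => simp
  | none =>
      cases hp : pvLoopPart (PySem.Str.lower query) semantic_map with
      | some t => simp
      | none => simpa using pvFallback_eq semantic_map
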